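-- pv_equiv track=rewrite | github.com/miliar/Code_Jam_Webscraper | Solutions_python/Problem_36/135.py | count
-- ===== SOURCE A (Python) =====
-- S = "welcome to code jam"
--
-- def count(str):
--     pre = [Data(-1,1)]
--     for c in S:
--         cur = []
--         for i in range(len(str)):
--             if c == str[i]:
--                 sum = 0
--                 for tmp in pre:
--                     if tmp.i < i:
--                         sum += tmp.cnt
--                 cur.append(Data(i, sum))
--         pre = cur
--         if len(pre) == 0:
--             break
--     ret = 0
--     for tmp in pre:
--         ret += tmp.cnt
--     return "%04d" % (ret % 10000)
--
-- class Data: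
--     def __init__(self, i, cnt):
--         self.i = i
--         self.cnt = cnt
-- ===== SOURCE B (Python) =====
-- S = "welcome to code jam"
--
-- def count(str):
--     n = len(str)
--     chars = set(str)
--     if any(c not in chars for c in S):
--         return "0000"
--     prev = [0] * n
--     base = 1
--     for c in S:
--         cur = [0] * n
--         run = base
--         for i in range(n):
--             if str[i] == c:
--                 cur[i] = run
--             run += prev[i]
--         prev, base = cur, 0
--     return "%04d" % (sum(prev) % 10000)
-- ===== Notes on version B (the rewrite author's own statement) =====
-- stated objective: faster
-- what changed: A keeps a sparse list of (position,count) records and rescans it for every matched position (O(|S|*n^2) when all characters of S occur); B first prunes via set membership (answer is 0 unless every character of S occurs) and otherwise runs a dense per-position DP, sweeping once per character of S with a running prefix sum, so the inner rescan disappears.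
import Mathlib
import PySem

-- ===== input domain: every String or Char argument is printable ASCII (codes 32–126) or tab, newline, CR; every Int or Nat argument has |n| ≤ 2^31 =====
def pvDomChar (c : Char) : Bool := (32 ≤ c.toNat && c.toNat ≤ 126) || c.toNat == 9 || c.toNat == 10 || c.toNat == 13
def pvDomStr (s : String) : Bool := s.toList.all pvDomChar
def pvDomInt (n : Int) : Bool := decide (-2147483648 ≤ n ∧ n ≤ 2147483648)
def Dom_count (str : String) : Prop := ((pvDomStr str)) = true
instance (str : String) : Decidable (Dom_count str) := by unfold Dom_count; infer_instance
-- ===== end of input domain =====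

-- B replaces A's quadratic inner rescan of `pre` by a single left-to-right pass keeping a
-- running prefix sum over a dense per-position count array (objective: faster, asymptotic).

-- ===== PORT A =====

structure AData where
  i : Int
  cnt : Int
deriving Repr, DecidableEq

-- the module-level constant S
def Sstr : String := "welcome to code jam"

-- '"%04d" % m' for m = ret % 10000 (nonnegative here, so zero-padding str(m) to width 4 is exact)
def fmt04 (r : Int) : String :=
  let d := (PySem.Int.toStr (PySem.Int.mod r 10000)).toList
  String.ofList (List.replicate (4 - d.length) '0' ++ d)

-- A's innermost loop: 'sum = 0; for tmp in pre: if tmp.i < i: sum += tmp.cnt'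
def aPreSumFold (pre : List AData) (i : Int) : Int :=
  pre.foldl (fun sm tmp => if tmp.i < i then sm + tmp.cnt else sm) 0

-- A's middle loop: 'cur = []; for i in range(len(str)): if c == str[i]: cur.append(Data(i, sum))'
def aInner (s : List Char) (c : Char) (pre : List AData) : List AData :=
  (List.range s.length).foldl
    (fun cur i => if c = s.getD i ' ' then cur ++ [⟨(i : Int), aPreSumFold pre (i : Int)⟩] else cur)
    []

-- one iteration of 'for c in S'; 'if pre.isEmpty then pre' models the 'if len(pre) == 0: break'
-- (once pre is empty the remaining iterations are skipped and the state stays [])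
def aStep (s : List Char) (pre : List AData) (c : Char) : List AData :=
  if pre.isEmpty then pre else aInner s c pre

def count (str : String) : String :=
  fmt04 ((Sstr.toList.foldl (aStep str.toList) [⟨-1, 1⟩]).foldl (fun r tmp => r + tmp.cnt) 0)

-- ===== PORT B =====

-- B's inner 'for i in range(n)' loop: cur is built left to right (cur = [0]*n with cur[i]
-- assigned in ascending order of i ≡ appending), run is the running prefix sum of prev
def bStep (s : List Char) (st : List Int × Int) (c : Char) : List Int × Int :=
  let r := (List.range s.length).foldl
    (fun (p : List Int × Int) i =>
      (p.1 ++ [if s.getD i ' ' = c then p.2 else 0], p.2 + st.1.getD i 0))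
    ([], st.2)
  (r.1, 0)

-- 'chars = set(str); if any(c not in chars for c in S): return "0000"' — the pruning guard
def count_alt (str : String) : String :=
  if Sstr.toList.any (fun c => !(PySem.Set.contains (PySem.Set.ofList str.toList) c)) then "0000"
  else fmt04 ((Sstr.toList.foldl (bStep str.toList) (List.replicate str.toList.length 0, 1)).1.foldl (· + ·) 0)

-- ===== PRECONDITION & SPEC =====
def Spec_count (str : String) (out : String) : Prop := out = count_alt str
instance (str : String) (out : String) : Decidable (Spec_count str out) := by unfold Spec_count; infer_instance

-- ===== CLAIM (what is proved, stated in full; the proofs are below) =====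
def Claim_equal_count : Prop := ∀ (str : String), Dom_count str → Spec_count str (count str)

-- ===== LEMMAS AND PROOFS =====

-- sum of the cnt fields of entries with index < j
def psum : List AData → Int → Int
  | [], _ => 0
  | t :: ts, j => (if t.i < j then t.cnt else 0) + psum ts j

-- total of the cnt fields
def csum : List AData → Int
  | [] => 0
  | t :: ts => t.cnt + csum ts

-- sum of the first m entries of prev (getD, Python-style 0 past the end)
def psumD (prev : List Int) : Nat → Int
  | 0 => 0
  | m + 1 => psumD prev m + prev.getD m 0

def adat (F : Nat → Int) (i : Nat) : AData := ⟨(i : Int), F i⟩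

theorem psum_foldl (j : Int) : ∀ (pre : List AData) (a : Int),
    pre.foldl (fun sm tmp => if tmp.i < j then sm + tmp.cnt else sm) a = a + psum pre j := by
  intro pre
  induction pre with
  | nil => intro a; simp [psum]
  | cons t ts ih =>
    intro a
    simp only [List.foldl_cons, psum, ih]
    split <;> ring

theorem aPreSumFold_eq (pre : List AData) (j : Int) : aPreSumFold pre j = psum pre j := by
  simp [aPreSumFold, psum_foldl]

theorem csum_foldl : ∀ (pre : List AData) (a : Int),
    pre.foldl (fun r tmp => r + tmp.cnt) a = a + csum pre := by
  intro pre
  induction pre with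
  | nil => intro a; simp [csum]
  | cons t ts ih => intro a; simp only [List.foldl_cons, csum, ih]; ring

theorem sum_foldl : ∀ (l : List Int) (a : Int), l.foldl (· + ·) a = a + l.sum := by
  intro l
  induction l with
  | nil => intro a; simp
  | cons x xs ih => intro a; simp only [List.foldl_cons, ih, List.sum_cons]; ring

theorem psum_eq_csum {j : Int} : ∀ {pre : List AData}, (∀ t ∈ pre, t.i < j) → psum pre j = csum pre := by
  intro pre
  induction pre with
  | nil => intro _; rfl
  | cons t ts ih =>
    intro h
    have h1 : t.i < j := h t (by simp)
    simp only [psum, csum, if_pos h1, ih (fun u hu => h u (by simp [hu]))]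

theorem psumD_eq_take : ∀ (prev : List Int) (m : Nat), psumD prev m = (prev.take m).sum := by
  intro prev m
  induction m with
  | zero => simp [psumD]
  | succ m ih =>
    rw [psumD, ih, List.take_add_one, List.sum_append, List.getD_eq_getElem?_getD]
    cases h : prev[m]? <;> simp

theorem aInner_eq (s : List Char) (c : Char) (pre : List AData) :
    aInner s c pre = ((List.range s.length).filter (fun i => decide (c = s.getD i ' '))).map
      (adat (fun i => psum pre (i : Int))) := by
  unfold aInner
  have key : ∀ m : Nat, (List.range m).foldl
      (fun cur i => if c = s.getD i ' ' then cur ++ [⟨(i : Int), aPreSumFold pre (i : Int)⟩] else cur) [] =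
      ((List.range m).filter (fun i => decide (c = s.getD i ' '))).map
        (adat (fun i => psum pre (i : Int))) := by
    intro m
    induction m with
    | zero => simp
    | succ m ih =>
      rw [List.range_succ, List.foldl_append, ih, List.filter_append, List.map_append]
      by_cases h : c = s[m]?.getD ' ' <;>
        simp [List.getD_eq_getElem?_getD, h, adat, aPreSumFold_eq]
  exact key s.length

theorem bFold_eq (s : List Char) (c : Char) (prev : List Int) (base : Int) : ∀ m : Nat,
    (List.range m).foldl
      (fun (p : List Int × Int) i =>
        (p.1 ++ [if s.getD i ' ' = c then p.2 else 0], p.2 + prev.getD i 0)) ([], base) =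
    ((List.range m).map (fun i => if s.getD i ' ' = c then base + psumD prev i else 0),
     base + psumD prev m) := by
  intro m
  induction m with
  | zero => simp [psumD]
  | succ m ih =>
    rw [List.range_succ, List.foldl_append, ih, List.map_append]
    simp [psumD, add_assoc]

theorem filter_lt_range (j : Nat) : ∀ n : Nat,
    (List.range n).filter (fun i => decide (i < j)) = List.range (min j n) := by
  intro n
  induction n with
  | zero => simp
  | succ n ih =>
    rw [List.range_succ, List.filter_append, ih]
    by_cases h : n < j
    · have h1 : min j (n + 1) = n + 1 := by omega
      have h2 : min j n = n := by omega
      rw [h1, h2]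
      simp [h, List.range_succ]
    · have h1 : min j (n + 1) = min j n := by omega
      rw [h1]
      simp [h]

theorem psumD_map_range (g : Nat → Int) (n : Nat) : ∀ j : Nat,
    psumD ((List.range n).map g) j = ((List.range (min j n)).map g).sum := by
  intro j
  induction j with
  | zero => simp [psumD]
  | succ j ih =>
    rw [psumD, ih, List.getD_eq_getElem?_getD]
    by_cases h : j < n
    · have h1 : min (j + 1) n = j + 1 := by omega
      have h2 : min j n = j := by omega
      rw [h1, h2]
      simp [h, List.range_succ]
    · have h1 : min (j + 1) n = n := by omega
      have h2 : min j n = n := by omega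
      rw [h1, h2]
      simp [h]

theorem psum_filtermap (P : Nat → Prop) [DecidablePred P] (F : Nat → Int) (j : Nat) :
    ∀ l : List Nat,
    psum ((l.filter (fun i => decide (P i))).map (adat F)) (j : Int) =
    ((l.filter (fun i => decide (i < j))).map (fun i => if P i then F i else 0)).sum := by
  intro l
  induction l with
  | nil => rfl
  | cons a l ih =>
    have hcast : ((a : Int) < (j : Int)) ↔ a < j := by exact_mod_cast Iff.rfl
    by_cases hp : P a <;> by_cases hj : a < j <;>
      simp [hp, hj, psum, adat, ih, hcast]

theorem bStep_eq (s : List Char) (c : Char) (prev : List Int) (base : Int) :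
    bStep s (prev, base) c =
      ((List.range s.length).map (fun i => if s.getD i ' ' = c then base + psumD prev i else 0), 0) := by
  show ((((List.range s.length).foldl
    (fun (p : List Int × Int) i =>
      (p.1 ++ [if s.getD i ' ' = c then p.2 else 0], p.2 + prev.getD i 0)) ([], base))).1, 0) = _
  rw [bFold_eq]

-- a state whose prefix sums are all zero stays zero through one step of B
theorem zero_step (s : List Char) (c : Char) (prev : List Int) (base : Int)
    (hz : ∀ j : Nat, base + psumD prev j = 0) :
    ∀ j : Nat, (bStep s (prev, base) c).2 + psumD (bStep s (prev, base) c).1 j = 0 := by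
  intro j
  rw [bStep_eq]
  simp only [psumD_map_range, zero_add]
  apply List.sum_eq_zero
  intro x hx
  obtain ⟨i, _, hix⟩ := List.mem_map.mp hx
  rw [← hix]
  split
  · exact hz i
  · rfl

theorem zero_fold (s : List Char) : ∀ (cs : List Char) (st : List Int × Int),
    (∀ j : Nat, st.2 + psumD st.1 j = 0) →
    ∀ j : Nat, (cs.foldl (bStep s) st).2 + psumD (cs.foldl (bStep s) st).1 j = 0 := by
  intro cs
  induction cs with
  | nil => intro st h j; exact h j
  | cons c cs ih =>
    intro st h j
    have hstep := zero_step s c st.1 st.2 (by intro i; have := h i; omega)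
    rw [List.foldl_cons]
    exact ih (bStep s (st.1, st.2) c) hstep j

-- a character of S that never occurs in str zeroes B's state
theorem missing_step (s : List Char) (c : Char) (hc : c ∉ s) (prev : List Int) (base : Int) :
    ∀ j : Nat, (bStep s (prev, base) c).2 + psumD (bStep s (prev, base) c).1 j = 0 := by
  intro j
  rw [bStep_eq]
  simp only [psumD_map_range, zero_add]
  apply List.sum_eq_zero
  intro x hx
  obtain ⟨i, hi, hix⟩ := List.mem_map.mp hx
  have hin : i < s.length := by
    have := List.mem_range.mp hi
    omega
  rw [← hix, if_neg]
  intro heq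
  apply hc
  rw [← heq, List.getD_eq_getElem?_getD, List.getElem?_eq_getElem hin]
  exact List.getElem_mem hin

theorem missing_fold (s : List Char) : ∀ (cs : List Char) (st : List Int × Int),
    (∃ c ∈ cs, c ∉ s) →
    ∀ j : Nat, (cs.foldl (bStep s) st).2 + psumD (cs.foldl (bStep s) st).1 j = 0 := by
  intro cs
  induction cs with
  | nil => rintro st ⟨c, hc, _⟩ j; simp at hc
  | cons c' cs ih =>
    rintro st ⟨c, hc, hcs⟩ j
    rw [List.foldl_cons]
    rcases List.mem_cons.mp hc with rfl | hmem
    · exact zero_fold s cs _ (by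
        have := missing_step s c hcs st.1 st.2
        simpa using this) j
    · exact ih _ ⟨c, hmem, hcs⟩ j

-- the core step: one character of S preserves the cross-implementation invariant
theorem step_inv (s : List Char) (c : Char) (pre : List AData) (prev : List Int) (base : Int)
    (hInv : ∀ j : Nat, psum pre (j : Int) = base + psumD prev j) :
    (∀ j : Nat, psum (aStep s pre c) (j : Int) =
        (bStep s (prev, base) c).2 + psumD (bStep s (prev, base) c).1 j)
    ∧ (∀ t ∈ aStep s pre c, t.i < (s.length : Int))
    ∧ (bStep s (prev, base) c).1.length = s.length := by
  rw [bStep_eq]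
  by_cases he : pre.isEmpty
  · have hpre : pre = [] := List.isEmpty_iff.mp he
    subst hpre
    have hz : ∀ i : Nat, base + psumD prev i = 0 := by
      intro i; have := hInv i; simp [psum] at this; omega
    refine ⟨?_, ?_, by simp⟩
    · intro j
      simp only [aStep, List.isEmpty_nil, psumD_map_range, zero_add]
      symm
      apply List.sum_eq_zero
      intro x hx
      obtain ⟨i, _, hix⟩ := List.mem_map.mp hx
      rw [← hix]
      split
      · exact hz i
      · rfl
    · intro t ht; simp [aStep] at ht
  · have hA : aStep s pre c = ((List.range s.length).filter (fun i => decide (c = s.getD i ' '))).map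
        (adat (fun i => psum pre (i : Int))) := by
      simp [aStep, he, aInner_eq]
    refine ⟨?_, ?_, by simp⟩
    · intro j
      rw [hA, psum_filtermap (fun i => c = s.getD i ' ') (fun i => psum pre (i : Int)) j,
        filter_lt_range, psumD_map_range, zero_add]
      congr 1
      apply List.map_congr_left
      intro i _
      rw [hInv i]
      rcases eq_or_ne (s[i]?.getD ' ') c with h | h
      · simp [List.getD_eq_getElem?_getD, h]
      · simp [List.getD_eq_getElem?_getD, h, h.symm]
    · intro t ht
      rw [hA] at ht
      obtain ⟨i, hi, hit⟩ := List.mem_map.mp ht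
      have hi' : i ∈ List.range s.length := List.mem_of_mem_filter hi
      have hlt : i < s.length := List.mem_range.mp hi'
      rw [← hit]
      show (i : Int) < (s.length : Int)
      exact_mod_cast hlt

theorem loop_inv (s : List Char) : ∀ (cs : List Char) (pre : List AData) (prev : List Int) (base : Int),
    (∀ j : Nat, psum pre (j : Int) = base + psumD prev j) →
    (∀ t ∈ pre, t.i < (s.length : Int)) →
    prev.length = s.length →
    (∀ j : Nat, psum (cs.foldl (aStep s) pre) (j : Int) =
        (cs.foldl (bStep s) (prev, base)).2 + psumD (cs.foldl (bStep s) (prev, base)).1 j)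
    ∧ (∀ t ∈ cs.foldl (aStep s) pre, t.i < (s.length : Int))
    ∧ (cs.foldl (bStep s) (prev, base)).1.length = s.length := by
  intro cs
  induction cs with
  | nil => intro pre prev base h1 h2 h3; exact ⟨h1, h2, h3⟩
  | cons c cs ih =>
    intro pre prev base h1 h2 h3
    obtain ⟨s1, s2, s3⟩ := step_inv s c pre prev base h1
    have := ih (aStep s pre c) (bStep s (prev, base) c).1 (bStep s (prev, base) c).2 s1 s2 s3
    simpa using this

theorem bFold_snd (s : List Char) : ∀ (cs : List Char) (st : List Int × Int),
    (cs.foldl (bStep s) st).2 = if cs.isEmpty then st.2 else 0 := by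
  intro cs
  induction cs with
  | nil => intro st; simp
  | cons c cs ih =>
    intro st
    rw [List.foldl_cons, ih]
    by_cases h : cs.isEmpty <;> simp [h, bStep]

theorem psumD_replicate_zero (n : Nat) : ∀ j : Nat, psumD (List.replicate n (0 : Int)) j = 0 := by
  intro j
  induction j with
  | zero => rfl
  | succ j ih =>
    rw [psumD, ih, List.getD_eq_getElem?_getD, List.getElem?_replicate]
    split <;> simp

-- ===== VERDICT (by name: the statement is the Claim_ definition above) =====
theorem count_spec : Claim_equal_count := by
  intro str _
  unfold Spec_count count count_alt
  set s := str.toList with hs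
  obtain ⟨hInv, hBnd, hLen⟩ := loop_inv s Sstr.toList [⟨-1, 1⟩] (List.replicate s.length 0) 1
    (by
      intro j
      have h1 : (-1 : Int) < (j : Int) := by omega
      simp [psum, h1, psumD_replicate_zero])
    (by
      intro t ht
      simp at ht
      subst ht
      show (-1 : Int) < (s.length : Int)
      omega)
    (by simp)
  have hemp : Sstr.toList.isEmpty = false := by decide
  have hsnd : (Sstr.toList.foldl (bStep s) (List.replicate s.length 0, 1)).2 = 0 := by
    rw [bFold_snd, hemp]
    rfl
  have htake := List.take_length
    (l := (Sstr.toList.foldl (bStep s) (List.replicate s.length 0, 1)).1)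
  rw [hLen] at htake
  have hmain : (Sstr.toList.foldl (aStep s) [⟨-1, 1⟩]).foldl (fun r tmp => r + tmp.cnt) 0
      = (Sstr.toList.foldl (bStep s) (List.replicate s.length 0, 1)).1.foldl (· + ·) 0 := by
    rw [csum_foldl, sum_foldl, zero_add, zero_add,
      ← psum_eq_csum hBnd, hInv s.length, hsnd, zero_add, psumD_eq_take, htake]
  cases hg : Sstr.toList.any (fun c => !(PySem.Set.contains (PySem.Set.ofList s) c)) with
  | false => simp only [Bool.false_eq_true, if_false]; exact congrArg fmt04 hmain
  | true =>
    simp only [if_true]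
    obtain ⟨c, hcS, hcns⟩ : ∃ c ∈ Sstr.toList, c ∉ s := by
      obtain ⟨c, hcS, hcb⟩ := List.any_eq_true.mp hg
      refine ⟨c, hcS, fun hmem => ?_⟩
      simp [PySem.Set.contains, PySem.Set.mem_ofList, hmem] at hcb
    have h0 : (Sstr.toList.foldl (aStep s) [⟨-1, 1⟩]).foldl (fun r tmp => r + tmp.cnt) 0 = 0 := by
      rw [csum_foldl, zero_add, ← psum_eq_csum hBnd, hInv s.length, hsnd, zero_add]
      have := missing_fold s Sstr.toList (List.replicate s.length 0, 1) ⟨c, hcS, hcns⟩ s.length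
      rw [hsnd, zero_add] at this
      exact this
    rw [h0]
    decide
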